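-- pv_equiv track=rewrite | github.com/d4rkr00t/leet-code | python/geeks/9-sum-of-bit-diffs.py | bit_diff_sum
-- ===== SOURCE A (Python) =====
-- def bit_diff_sum(arr):
--     sum = 0
--
--     for i in range(0, 32):
--         count = 0
--         for j in arr:
--             if (j & (1 << i)):
--                 count += 1
--
--         sum += (count * (len(arr) - count) * 2)
--
--     return sum
-- ===== SOURCE B (Python) =====
-- def bit_diff_sum(arr):
--     total = 0
--     for x in arr:
--         for y in arr:
--             total += bin((x ^ y) & 0xFFFFFFFF).count('1')
--     return total
-- ===== Notes on version B (the rewrite author's own statement) =====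
-- stated objective: alternative
-- what changed: Replaced A's per-bit-position counting (for each of 32 bit positions, count set bits and use count*(n-count)*2) by the direct brute-force pairwise sum of popcounts of the 32-bit-masked XOR of every ordered pair.
import Mathlib
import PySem

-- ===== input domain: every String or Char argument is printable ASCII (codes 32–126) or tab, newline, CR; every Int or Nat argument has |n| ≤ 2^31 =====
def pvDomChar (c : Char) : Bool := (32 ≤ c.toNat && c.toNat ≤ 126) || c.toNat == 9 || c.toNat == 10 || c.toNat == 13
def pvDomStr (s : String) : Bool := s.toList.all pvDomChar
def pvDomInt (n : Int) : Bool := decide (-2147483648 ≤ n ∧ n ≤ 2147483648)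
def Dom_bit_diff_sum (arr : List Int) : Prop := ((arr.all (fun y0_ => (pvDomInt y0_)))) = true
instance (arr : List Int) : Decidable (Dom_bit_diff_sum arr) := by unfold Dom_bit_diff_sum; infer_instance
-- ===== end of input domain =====

-- B replaces A's per-bit-position counting by the direct pairwise popcount of the masked XOR (alternative algorithm of similar cost; not faster).

-- ===== PORT A =====
-- 'for i in range(0, 32)' → fold over List.range 32; 'j & (1 << i)' truthy ↔ ≠ 0 (Int.land/Int shift are exact two's-complement, as Python's).
def bit_diff_sum (arr : List Int) : Int :=
  (List.range 32).foldl (fun sum (i : Nat) =>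
    let count := arr.foldl (fun count j =>
      if Int.land j ((1 : Int) <<< i) ≠ 0 then count + 1 else count) (0 : Int)
    sum + count * ((arr.length : Int) - count) * 2) 0

-- ===== PORT B =====
-- bin(n).count('1') for n ≥ 0: count of 1-digits in the binary expansion.
def pyBitCount (n : Nat) : Int :=
  if n = 0 then 0 else ((n % 2 : Nat) : Int) + pyBitCount (n / 2)
decreasing_by exact Nat.div_lt_self (Nat.pos_of_ne_zero (by assumption)) (by norm_num)

-- '(x ^ y) & 0xFFFFFFFF' is ≥ 0 (the mask is nonnegative), so Int.toNat is exact here.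
def bit_diff_sum_alt (arr : List Int) : Int :=
  arr.foldl (fun total x =>
    arr.foldl (fun total y =>
      total + pyBitCount (Int.toNat (Int.land (Int.xor x y) 0xFFFFFFFF))) total) 0

-- ===== PRECONDITION & SPEC =====
def Spec_bit_diff_sum (arr : List Int) (out : Int) : Prop := out = bit_diff_sum_alt arr
instance (arr : List Int) (out : Int) : Decidable (Spec_bit_diff_sum arr out) := by unfold Spec_bit_diff_sum; infer_instance

-- ===== CLAIM (what is proved, stated in full; the proofs are below) =====
def Claim_equal_bit_diff_sum : Prop := ∀ (arr : List Int), Dom_bit_diff_sum arr → Spec_bit_diff_sum arr (bit_diff_sum arr)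

-- ===== LEMMAS AND PROOFS =====

-- Python's 'j & (1 << i)' is truthy exactly when bit i of j is set.
theorem land_pow_ne (j : Int) (i : Nat) : Int.land j (2 ^ i) ≠ 0 ↔ j.testBit i := by
  cases j with
  | ofNat n =>
    have h1 : Int.land (Int.ofNat n) (2 ^ i) = Int.ofNat (n &&& 2 ^ i) := by
      show Int.land (Int.ofNat n) (Int.ofNat (2 ^ i)) = _; norm_cast
    rw [h1]
    simp [Int.testBit, Nat.and_two_pow]
  | negSucc m =>
    have h1 : Int.land (Int.negSucc m) (2 ^ i) = Int.ofNat (Nat.ldiff (2 ^ i) m) := by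
      show Int.land (Int.negSucc m) (Int.ofNat (2 ^ i)) = _; rfl
    rw [h1]
    have h2 : Nat.ldiff (2 ^ i) m = if m.testBit i then 0 else 2 ^ i := by
      apply Nat.eq_of_testBit_eq; intro k
      simp [Nat.testBit_ldiff, Nat.testBit_two_pow]
      split_ifs with hm
      · simp; intro hk; subst hk; simp [hm]
      · by_cases hk : i = k
        · subst hk; simp [Bool.eq_false_iff.mpr hm]
        · simp [hk]
    rw [h2]
    simp [Int.testBit]

-- bits of the masked value, read as a Nat, are z's low 32 bits
theorem mask_toNat_testBit (z : Int) (i : Nat) (hi : i < 32) :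
    (Int.toNat (Int.land z 0xFFFFFFFF)).testBit i = z.testBit i := by
  cases z with
  | ofNat n =>
    have h1 : Int.land (Int.ofNat n) 0xFFFFFFFF = Int.ofNat (n &&& 0xFFFFFFFF) := by
      show Int.land (Int.ofNat n) (Int.ofNat 0xFFFFFFFF) = _; norm_cast
    rw [h1]
    show (n &&& 0xFFFFFFFF).testBit i = n.testBit i
    rw [Nat.testBit_and]
    have hb : (0xFFFFFFFF : Nat).testBit i = true := by
      have hM : (0xFFFFFFFF : Nat) = 2 ^ 32 - 1 := by norm_num
      rw [hM, Nat.testBit_two_pow_sub_one]; simp [hi]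
    simp [hb]
  | negSucc m =>
    have h1 : Int.land (Int.negSucc m) 0xFFFFFFFF = Int.ofNat (Nat.ldiff 0xFFFFFFFF m) := by
      show Int.land (Int.negSucc m) (Int.ofNat 0xFFFFFFFF) = _; rfl
    rw [h1]
    show (Nat.ldiff 0xFFFFFFFF m).testBit i = (Int.negSucc m).testBit i
    rw [Nat.testBit_ldiff]
    have hb : (0xFFFFFFFF : Nat).testBit i = true := by
      have hM : (0xFFFFFFFF : Nat) = 2 ^ 32 - 1 := by norm_num
      rw [hM, Nat.testBit_two_pow_sub_one]; simp [hi]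
    simp [hb, Int.testBit]

theorem ldiff_le (a b : Nat) : Nat.ldiff a b ≤ a := by
  have h : a &&& Nat.ldiff a b = Nat.ldiff a b := by
    apply Nat.eq_of_testBit_eq; intro k
    simp [Nat.testBit_and, Nat.testBit_ldiff, Bool.and_assoc]
  calc Nat.ldiff a b = a &&& Nat.ldiff a b := h.symm
    _ ≤ a := Nat.and_le_left

theorem mask_toNat_lt (z : Int) : Int.toNat (Int.land z 0xFFFFFFFF) < 2 ^ 32 := by
  cases z with
  | ofNat n =>
    have h1 : Int.land (Int.ofNat n) 0xFFFFFFFF = Int.ofNat (n &&& 0xFFFFFFFF) := by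
      show Int.land (Int.ofNat n) (Int.ofNat 0xFFFFFFFF) = _; norm_cast
    rw [h1]
    have := Nat.and_le_right (n := n) (m := 0xFFFFFFFF)
    show (n &&& 0xFFFFFFFF) < 2 ^ 32
    omega
  | negSucc m =>
    have h1 : Int.land (Int.negSucc m) 0xFFFFFFFF = Int.ofNat (Nat.ldiff 0xFFFFFFFF m) := by
      show Int.land (Int.negSucc m) (Int.ofNat 0xFFFFFFFF) = _; rfl
    rw [h1]
    have := ldiff_le 0xFFFFFFFF m
    show Nat.ldiff 0xFFFFFFFF m < 2 ^ 32
    omega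

theorem pyBitCount_step (n : Nat) : pyBitCount n = ((n % 2 : Nat) : Int) + pyBitCount (n / 2) := by
  rw [pyBitCount]
  by_cases h : n = 0
  · subst h; simp [pyBitCount]
  · simp [h]

theorem pyBitCount_eq_sum (k : Nat) : ∀ n : Nat, n < 2 ^ k →
    pyBitCount n = ((List.range k).map (fun i => if n.testBit i then (1 : Int) else 0)).sum := by
  induction k with
  | zero => intro n h; interval_cases n; simp [pyBitCount]
  | succ k ih =>
    intro n h
    rw [pyBitCount_step, List.range_succ_eq_map]
    simp only [List.map_cons, List.sum_cons, List.map_map]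
    have h2 : n / 2 < 2 ^ k := by omega
    rw [ih (n / 2) h2]
    congr 1
    · rw [Nat.testBit_zero]; rcases Nat.mod_two_eq_zero_or_one n with h | h <;> simp [h]
    · congr 1
      apply List.map_congr_left
      intro i _
      simp [Function.comp, Nat.testBit_succ]

-- the pairwise popcount summand, expanded into per-bit contributions
theorem pc_mask (z : Int) :
    pyBitCount (Int.toNat (Int.land z 0xFFFFFFFF))
      = ((List.range 32).map (fun i => if z.testBit i then (1 : Int) else 0)).sum := by
  rw [pyBitCount_eq_sum 32 _ (mask_toNat_lt z)]
  apply congrArg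
  apply List.map_congr_left
  intro i hi
  rw [mask_toNat_testBit z i (List.mem_range.mp hi)]

-- foldl accumulator lemmas
-- A's inner loop counts the elements whose bit i is set (Prop-conditioned variant).
theorem foldl_count' (q : Int → Prop) [DecidablePred q] (l : List Int) (c0 : Int) :
    l.foldl (fun c j => if q j then c + 1 else c) c0 = c0 + (l.countP (fun j => decide (q j)) : Int) := by
  induction l generalizing c0 with
  | nil => simp
  | cons a l ih => by_cases h : q a <;> simp [h, ih, List.countP_cons] <;> push_cast <;> ring

theorem foldl_sum {α : Type} (f : α → Int) (l : List α) (s0 : Int) :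
    l.foldl (fun s x => s + f x) s0 = s0 + (l.map f).sum := by
  induction l generalizing s0 with
  | nil => simp
  | cons a l ih => simp [ih]; ring

theorem sum_map_add {α : Type} (f g : α → Int) (L : List α) :
    (L.map (fun i => f i + g i)).sum = (L.map f).sum + (L.map g).sum := by
  induction L with
  | nil => simp
  | cons a L ih => simp [ih]; ring

theorem list_sum_comm {α β : Type} (l : List α) (L : List β) (f : α → β → Int) :
    (l.map (fun x => (L.map (f x)).sum)).sum
      = (L.map (fun i => (l.map (fun x => f x i)).sum)).sum := by
  induction l with
  | nil => simp [List.map_const']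
  | cons a l ih =>
    simp only [List.map_cons, List.sum_cons, ih]
    rw [sum_map_add (fun i => f a i) (fun i => (l.map (fun x => f x i)).sum) L]

theorem sum_ct (p : Int → Bool) (l : List Int) :
    (l.map (fun y => if p y then (1 : Int) else 0)).sum = l.countP p := by
  induction l with
  | nil => simp
  | cons a l ih =>
    by_cases h : p a <;>
      simp only [List.map_cons, List.sum_cons, h, if_true, if_false, ih, List.countP_cons] <;>
      push_cast <;> ring

theorem sum_cf (p : Int → Bool) (l : List Int) :
    (l.map (fun y => if p y then (0 : Int) else 1)).sum = (l.length : Int) - l.countP p := by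
  induction l with
  | nil => simp
  | cons a l ih =>
    by_cases h : p a <;>
      simp only [List.map_cons, List.sum_cons, h, if_true, if_false, ih, List.countP_cons,
        List.length_cons] <;> push_cast <;> ring

theorem sum_if_ne (p : Int → Bool) (bx : Bool) (l : List Int) :
    (l.map (fun y => if xor bx (p y) then (1 : Int) else 0)).sum
      = if bx then (l.length : Int) - l.countP p else l.countP p := by
  cases bx with
  | false => simpa using sum_ct p l
  | true =>
    have he : (fun y => if p y = false then (1 : Int) else 0) = (fun y => if p y then (0 : Int) else 1) := by
      funext y; cases h : p y <;> simp
    simpa [he] using sum_cf p l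

theorem sum_if_const (p : Int → Bool) (A B : Int) (l : List Int) :
    (l.map (fun x => if p x then A else B)).sum
      = (l.countP p : Int) * A + ((l.length : Int) - l.countP p) * B := by
  induction l with
  | nil => simp
  | cons a l ih =>
    by_cases h : p a <;>
      simp only [List.map_cons, List.sum_cons, h, if_true, if_false, ih, List.countP_cons,
        List.length_cons] <;> push_cast <;> ring

-- per bit position: the pairwise differing-bit count equals count*(n-count)*2
theorem pair_count (p : Int → Bool) (arr : List Int) :
    (arr.map (fun x => (arr.map (fun y =>
        if xor (p x) (p y) then (1 : Int) else 0)).sum)).sum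
      = (arr.countP p : Int) * ((arr.length : Int) - arr.countP p) * 2 := by
  have h1 : (fun x => ((arr.map (fun y => if xor (p x) (p y) then (1 : Int) else 0)).sum))
      = (fun x => if p x then (arr.length : Int) - arr.countP p else (arr.countP p : Int)) := by
    funext x; rw [sum_if_ne]
  rw [h1, sum_if_const]
  ring

-- ===== VERDICT (by name: the statement is the Claim_ definition above) =====
theorem bit_diff_sum_spec : Claim_equal_bit_diff_sum := by
  intro arr _
  show bit_diff_sum arr = bit_diff_sum_alt arr
  -- A as a sum over bit positions
  have hpred : ∀ i : Nat, (fun j : Int => decide (Int.land j ((1 : Int) <<< i) ≠ 0))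
      = (fun j : Int => j.testBit i) := by
    intro i; funext j
    have hsh : ((1 : Int) <<< i) = 2 ^ i := by rw [Int.shiftLeft_eq]; ring
    rw [hsh]
    cases h : j.testBit i
    · have hz : Int.land j (2 ^ i) = 0 := by
        by_contra hc
        have hb := (land_pow_ne j i).mp hc
        simp [h] at hb
      simp [hz]
    · simp [(land_pow_ne j i).mpr h]
  have hA : bit_diff_sum arr = ((List.range 32).map (fun i =>
      (arr.countP (fun j => j.testBit i) : Int)
        * ((arr.length : Int) - arr.countP (fun j => j.testBit i)) * 2)).sum := by
    show (List.range 32).foldl (fun sum (i : Nat) => sum +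
        (arr.foldl (fun count j =>
          if Int.land j ((1 : Int) <<< i) ≠ 0 then count + 1 else count) (0 : Int))
        * ((arr.length : Int) - (arr.foldl (fun count j =>
          if Int.land j ((1 : Int) <<< i) ≠ 0 then count + 1 else count) (0 : Int))) * 2) 0 = _
    rw [foldl_sum (fun (i : Nat) =>
        (arr.foldl (fun count j =>
          if Int.land j ((1 : Int) <<< i) ≠ 0 then count + 1 else count) (0 : Int))
        * ((arr.length : Int) - (arr.foldl (fun count j =>
          if Int.land j ((1 : Int) <<< i) ≠ 0 then count + 1 else count) (0 : Int))) * 2)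
      (List.range 32) 0, zero_add]
    apply congrArg
    apply List.map_congr_left
    intro i _
    rw [foldl_count' (fun j => Int.land j ((1 : Int) <<< i) ≠ 0) arr 0, hpred i, zero_add]
  -- B as the same sum
  have hB : bit_diff_sum_alt arr = ((List.range 32).map (fun i =>
      (arr.map (fun x => (arr.map (fun y =>
        if xor (x.testBit i) (y.testBit i) then (1 : Int) else 0)).sum)).sum)).sum := by
    have hinner : ∀ (total x : Int), arr.foldl (fun total y =>
        total + pyBitCount (Int.toNat (Int.land (Int.xor x y) 0xFFFFFFFF))) total
        = total + ((List.range 32).map (fun i => (arr.map (fun y =>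
            if xor (x.testBit i) (y.testBit i) then (1 : Int) else 0)).sum)).sum := by
      intro total x
      rw [foldl_sum]
      congr 1
      have hpc : (fun y => pyBitCount (Int.toNat (Int.land (Int.xor x y) 0xFFFFFFFF)))
          = (fun y => ((List.range 32).map (fun i =>
              if xor (x.testBit i) (y.testBit i) then (1 : Int) else 0)).sum) := by
        funext y
        rw [pc_mask]
        apply congrArg
        apply List.map_congr_left
        intro i _
        rw [Int.testBit_lxor]
      rw [hpc, list_sum_comm arr (List.range 32)
        (fun y i => if xor (x.testBit i) (y.testBit i) then (1 : Int) else 0)]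
    show arr.foldl (fun total x => arr.foldl (fun total y =>
        total + pyBitCount (Int.toNat (Int.land (Int.xor x y) 0xFFFFFFFF))) total) 0 = _
    simp only [hinner]
    rw [foldl_sum (fun x => ((List.range 32).map (fun i => (arr.map (fun y =>
          if xor (x.testBit i) (y.testBit i) then (1 : Int) else 0)).sum)).sum) arr 0, zero_add]
    rw [list_sum_comm arr (List.range 32)
      (fun x i => (arr.map (fun y => if xor (x.testBit i) (y.testBit i) then (1 : Int) else 0)).sum)]
  rw [hA, hB]
  apply congrArg
  apply List.map_congr_left
  intro i _
  rw [pair_count (fun j => j.testBit i) arr]
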